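-- pv_equiv track=rewrite | github.com/pabloschwarzenberg/grader | hito2_ej2/hito2_ej2_7e6aec09d2f767107425de0df73a9d4a.py | secuencia
-- ===== SOURCE A (Python) =====
-- def secuencia(adn):
--     for i in adn:
--       if i == "A":
--         pass
--       elif i == "C":
--         pass
--       elif i == "T":
--         pass
--       elif i == "G":
--         pass
--       else:
--         return True
-- ===== SOURCE B (Python) =====
-- def secuencia(adn):
--     invalid = set(adn) - set("ACGT")
--     if invalid:
--         return True
-- ===== Notes on version B (the rewrite author's own statement) =====
-- stated objective: idiomatic
-- what changed: Replaces the per-character branch chain with early return by one whole-string set construction and a set difference against the allowed alphabet, returning True iff any invalid character remains.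
import Mathlib
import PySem

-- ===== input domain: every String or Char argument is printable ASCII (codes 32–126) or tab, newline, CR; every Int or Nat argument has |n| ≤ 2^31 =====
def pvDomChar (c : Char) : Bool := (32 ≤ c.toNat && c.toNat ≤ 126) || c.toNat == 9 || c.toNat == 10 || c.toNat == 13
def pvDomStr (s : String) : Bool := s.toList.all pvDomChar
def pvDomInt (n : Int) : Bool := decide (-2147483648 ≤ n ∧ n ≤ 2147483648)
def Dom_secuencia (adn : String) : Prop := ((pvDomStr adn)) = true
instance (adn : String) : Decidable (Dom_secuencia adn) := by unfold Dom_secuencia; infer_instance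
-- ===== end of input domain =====

-- B: builds set(adn) - set("ACGT") once and returns true iff it is non-empty, instead of A's per-character branch chain (idiomatic rewrite; return value only).
-- ===== PORT A =====
def secuenciaLoop : List Char → Option Bool
  | [] => none
  | i :: rest =>
    if i = 'A' then secuenciaLoop rest
    else if i = 'C' then secuenciaLoop rest
    else if i = 'T' then secuenciaLoop rest
    else if i = 'G' then secuenciaLoop rest
    else some true

def secuencia (adn : String) : Option Bool :=
  secuenciaLoop adn.toList

-- ===== PORT B =====
def secuencia_alt (adn : String) : Option Bool :=
  let invalid : PySem.Set Char :=
    PySem.Set.diff (PySem.Set.ofList adn.toList) (PySem.Set.ofList "ACGT".toList)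
  if invalid.length ≠ 0 then some true else none

-- ===== PRECONDITION & SPEC =====
def Spec_secuencia (adn : String) (out : Option Bool) : Prop := out = secuencia_alt adn
instance (adn : String) (out : Option Bool) : Decidable (Spec_secuencia adn out) := by unfold Spec_secuencia; infer_instance

-- ===== CLAIM (what is proved, stated in full; the proofs are below) =====
def Claim_equal_secuencia : Prop := ∀ (adn : String), Dom_secuencia adn → Spec_secuencia adn (secuencia adn)

-- ===== LEMMAS AND PROOFS =====

-- ===== VERDICT (by name: the statement is the Claim_ definition above) =====
def pvOkChar (c : Char) : Bool := c = 'A' || c = 'C' || c = 'T' || c = 'G'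

theorem secuencia_loop_eq (l : List Char) :
    secuenciaLoop l = if l.all pvOkChar then none else some true := by
  induction l with
  | nil => rfl
  | cons c rest ih =>
    simp only [secuenciaLoop, List.all_cons]
    split_ifs with h1 h2 h3 h4 <;> simp_all [pvOkChar]

theorem secuencia_diff_nil_iff (l : List Char) :
    ((PySem.Set.ofList l).diff (PySem.Set.ofList "ACGT".toList) = []) ↔ l.all pvOkChar = true := by
  simp [PySem.Set.diff, List.filter_eq_nil_iff, PySem.Set.mem_ofList, pvOkChar,
    List.all_eq_true, PySem.Set.contains, show "ACGT".toList = ['A','C','G','T'] from rfl]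
  constructor <;> intro h x hx <;> have := h x hx <;> tauto

theorem secuencia_spec : Claim_equal_secuencia := by
  intro adn _
  unfold Spec_secuencia secuencia secuencia_alt
  rw [secuencia_loop_eq]
  by_cases h : (PySem.Set.ofList adn.toList).diff (PySem.Set.ofList "ACGT".toList) = []
  · rw [if_pos ((secuencia_diff_nil_iff _).mp h), h]
    rfl
  · rw [if_neg (fun hc => h ((secuencia_diff_nil_iff _).mpr hc)),
      if_pos (fun h0 => h (List.length_eq_zero_iff.mp h0))]
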